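-- pv_equiv track=rewrite | github.com/FlexiInc/sirpi-gcp-backend | src/agentcore/config/framework_metadata.py | detect_frontend_framework_from_dependencies
-- ===== SOURCE A (Python) =====
-- from typing import Dict, List, Optional
--
-- def detect_frontend_framework_from_dependencies(dependencies: Dict[str, str]) -> Optional[str]:
--     """
--     Detect frontend framework from dependencies.
--     Used for monorepo scenarios to determine frontend build output.
--
--     Args:
--         dependencies: Dictionary of package names to versions
--
--     Returns:
--         Detected framework name or None
--     """
--     dep_lower = {k.lower(): v for k, v in dependencies.items()}
--
--     # Priority-ordered detection
--     if "next" in dep_lower: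
--         return "next.js"
--     elif "@angular/core" in dep_lower:
--         return "angular"
--     elif "vue" in dep_lower:
--         return "vue"
--     elif "svelte" in dep_lower:
--         return "svelte"
--     elif "@sveltejs/kit" in dep_lower:
--         return "sveltekit"
--     elif "nuxt" in dep_lower:
--         return "nuxt"
--     elif "gatsby" in dep_lower:
--         return "gatsby"
--     elif "react" in dep_lower:
--         return "react"
--
--     return None
-- ===== SOURCE B (Python) =====
-- from typing import Dict, List, Optional
--
-- _FRAMEWORKS = ["next.js", "angular", "vue", "svelte", "sveltekit", "nuxt", "gatsby", "react"]
-- _RANK = {"next": 0, "@angular/core": 1, "vue": 2, "svelte": 3,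
--          "@sveltejs/kit": 4, "nuxt": 5, "gatsby": 6, "react": 7}
--
-- def detect_frontend_framework_from_dependencies(dependencies: Dict[str, str]) -> Optional[str]:
--     best = None
--     for k in dependencies:
--         r = _RANK.get(k.lower())
--         if r is not None and (best is None or r < best):
--             best = r
--     return _FRAMEWORKS[best] if best is not None else None
-- ===== Notes on version B (the rewrite author's own statement) =====
-- stated objective: alternative
-- what changed: Replaces the build-a-lowercased-dict-then-eight-membership-tests chain with a single fold over the dependencies that keeps the minimum priority rank from a key->rank table and indexes a framework list at the end.
import Mathlib
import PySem

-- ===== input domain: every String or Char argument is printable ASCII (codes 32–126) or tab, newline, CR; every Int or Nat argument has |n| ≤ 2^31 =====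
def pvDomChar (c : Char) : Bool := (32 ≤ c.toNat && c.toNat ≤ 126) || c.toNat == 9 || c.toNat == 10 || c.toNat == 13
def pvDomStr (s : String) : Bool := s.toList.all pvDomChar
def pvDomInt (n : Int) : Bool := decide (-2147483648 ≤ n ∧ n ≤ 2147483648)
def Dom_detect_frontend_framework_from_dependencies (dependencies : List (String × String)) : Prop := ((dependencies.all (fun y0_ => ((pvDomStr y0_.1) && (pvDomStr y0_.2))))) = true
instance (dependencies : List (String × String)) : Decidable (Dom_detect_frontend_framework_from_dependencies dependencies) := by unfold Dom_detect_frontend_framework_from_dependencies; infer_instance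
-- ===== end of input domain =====

-- B replaces A's lowercased-dict build plus eight-way if/elif membership chain by one fold
-- computing the minimum priority rank from a key->rank table (objective: alternative).


-- ===== PORT A =====
def detect_frontend_framework_from_dependencies (dependencies : List (String × String)) : Option String :=
  let dep_lower : PySem.Dict String String :=
    dependencies.foldl (fun d kv => d.insert (PySem.Str.lower kv.1) kv.2) PySem.Dict.empty
  if dep_lower.contains "next" then some "next.js"
  else if dep_lower.contains "@angular/core" then some "angular"
  else if dep_lower.contains "vue" then some "vue"
  else if dep_lower.contains "svelte" then some "svelte"
  else if dep_lower.contains "@sveltejs/kit" then some "sveltekit"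
  else if dep_lower.contains "nuxt" then some "nuxt"
  else if dep_lower.contains "gatsby" then some "gatsby"
  else if dep_lower.contains "react" then some "react"
  else none

-- ===== PORT B =====
def pvFrameworks : List String :=
  ["next.js", "angular", "vue", "svelte", "sveltekit", "nuxt", "gatsby", "react"]

def pvRankDict : PySem.Dict String Nat :=
  PySem.Dict.mk [("next", 0), ("@angular/core", 1), ("vue", 2), ("svelte", 3),
                 ("@sveltejs/kit", 4), ("nuxt", 5), ("gatsby", 6), ("react", 7)]

def detect_frontend_framework_from_dependencies_alt (dependencies : List (String × String)) : Option String :=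
  let best : Option Nat :=
    dependencies.foldl
      (fun best kv =>
        match pvRankDict.get? (PySem.Str.lower kv.1) with
        | none => best
        | some r =>
          match best with
          | none => some r
          | some b => if r < b then some r else some b)
      none
  match best with
  | none => none
  | some b => PySem.List.pyGet? pvFrameworks (b : Int)   -- _FRAMEWORKS[best]; best < 8 always, so never none

-- ===== PRECONDITION & SPEC =====
def Spec_detect_frontend_framework_from_dependencies (dependencies : List (String × String)) (out : Option String) : Prop := out = detect_frontend_framework_from_dependencies_alt dependencies
instance (dependencies : List (String × String)) (out : Option String) : Decidable (Spec_detect_frontend_framework_from_dependencies dependencies out) := by unfold Spec_detect_frontend_framework_from_dependencies; infer_instance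

-- ===== CLAIM (what is proved, stated in full; the proofs are below) =====
def Claim_equal_detect_frontend_framework_from_dependencies : Prop := ∀ (dependencies : List (String × String)), Dom_detect_frontend_framework_from_dependencies dependencies → Spec_detect_frontend_framework_from_dependencies dependencies (detect_frontend_framework_from_dependencies dependencies)

-- ===== LEMMAS AND PROOFS =====

-- whether some dependency key lowercases to t
def pvMemKey (deps : List (String × String)) (t : String) : Bool :=
  deps.any (fun kv => t == PySem.Str.lower kv.1)

-- the priority index A's chain selects, as a function of the eight memberships
def pvChainIdx (deps : List (String × String)) : Option Nat :=
  if pvMemKey deps "next" then some 0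
  else if pvMemKey deps "@angular/core" then some 1
  else if pvMemKey deps "vue" then some 2
  else if pvMemKey deps "svelte" then some 3
  else if pvMemKey deps "@sveltejs/kit" then some 4
  else if pvMemKey deps "nuxt" then some 5
  else if pvMemKey deps "gatsby" then some 6
  else if pvMemKey deps "react" then some 7
  else none

def pvOmin : Option Nat → Option Nat → Option Nat
  | none, b => b
  | a, none => a
  | some x, some y => some (min x y)

def pvStep (acc : Option Nat) (kv : String × String) : Option Nat :=
  match pvRankDict.get? (PySem.Str.lower kv.1) with
  | none => acc
  | some r =>
    match acc with
    | none => some r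
    | some b => if r < b then some r else some b

def pvBest (deps : List (String × String)) : Option Nat := deps.foldl pvStep none

lemma pv_contains_fold (deps : List (String × String)) (d : PySem.Dict String String) (t : String) :
    (deps.foldl (fun d kv => d.insert (PySem.Str.lower kv.1) kv.2) d).contains t
      = (d.contains t || pvMemKey deps t) := by
  induction deps generalizing d with
  | nil => simp [pvMemKey]
  | cons kv deps ih =>
    simp [pvMemKey, List.foldl, ih, PySem.Dict.contains_insert] at *
    cases d.contains t <;> simp [Bool.or_comm]

lemma pv_A_eq (deps : List (String × String)) :
    detect_frontend_framework_from_dependencies deps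
      = (pvChainIdx deps).bind (fun i => PySem.List.pyGet? pvFrameworks (i : Int)) := by
  simp only [detect_frontend_framework_from_dependencies, pv_contains_fold,
    PySem.Dict.contains_empty, Bool.false_or, pvChainIdx]
  split_ifs <;> rfl

lemma pv_omin_assoc (a b c : Option Nat) : pvOmin (pvOmin a b) c = pvOmin a (pvOmin b c) := by
  cases a <;> cases b <;> cases c <;> simp [pvOmin, Nat.min_assoc]

lemma pv_step_eq (acc : Option Nat) (kv : String × String) :
    pvStep acc kv = pvOmin acc (pvRankDict.get? (PySem.Str.lower kv.1)) := by
  unfold pvStep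
  cases pvRankDict.get? (PySem.Str.lower kv.1) <;> cases acc <;>
    (simp [pvOmin, Nat.min_def]; try (split_ifs <;> simp_all <;> omega))

lemma pv_fold_omin (deps : List (String × String)) (acc : Option Nat) :
    deps.foldl pvStep acc = pvOmin acc (pvBest deps) := by
  induction deps generalizing acc with
  | nil => cases acc <;> rfl
  | cons kv deps ih =>
    have hb : pvBest (kv :: deps) = pvOmin (pvRankDict.get? (PySem.Str.lower kv.1)) (pvBest deps) := by
      have h0 : pvStep none kv = pvRankDict.get? (PySem.Str.lower kv.1) := by
        rw [pv_step_eq]; cases pvRankDict.get? (PySem.Str.lower kv.1) <;> rfl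
      show List.foldl pvStep (pvStep none kv) deps = _
      rw [ih, h0]
    rw [List.foldl_cons, ih, hb, pv_step_eq, pv_omin_assoc]

lemma pv_best_cons (kv : String × String) (deps : List (String × String)) :
    pvBest (kv :: deps) = pvOmin (pvRankDict.get? (PySem.Str.lower kv.1)) (pvBest deps) := by
  have h0 : pvStep none kv = pvRankDict.get? (PySem.Str.lower kv.1) := by
    rw [pv_step_eq]; cases pvRankDict.get? (PySem.Str.lower kv.1) <;> rfl
  show List.foldl pvStep (pvStep none kv) deps = _
  rw [pv_fold_omin, h0]

lemma pv_memKey_cons (kv : String × String) (deps : List (String × String)) (t : String) :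
    pvMemKey (kv :: deps) t = ((t == PySem.Str.lower kv.1) || pvMemKey deps t) := by
  simp [pvMemKey]

set_option maxHeartbeats 1000000 in
lemma pv_best_eq_chain (deps : List (String × String)) :
    pvBest deps = pvChainIdx deps := by
  induction deps with
  | nil => simp [pvBest, pvChainIdx, pvMemKey, List.foldl]
  | cons kv deps ih =>
    rw [pv_best_cons, ih]
    by_cases h0 : PySem.Str.lower kv.1 = "next"
    · have hr : pvRankDict.get? (PySem.Str.lower kv.1) = some 0 := by rw [h0]; decide
      rw [hr]
      simp only [pvChainIdx, pv_memKey_cons, h0, String.reduceBEq, Bool.false_or, Bool.true_or]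
      split_ifs <;> simp_all [pvOmin]
    by_cases h1 : PySem.Str.lower kv.1 = "@angular/core"
    · have hr : pvRankDict.get? (PySem.Str.lower kv.1) = some 1 := by rw [h1]; decide
      rw [hr]
      simp only [pvChainIdx, pv_memKey_cons, h1, String.reduceBEq, Bool.false_or, Bool.true_or]
      split_ifs <;> simp_all [pvOmin]
    by_cases h2 : PySem.Str.lower kv.1 = "vue"
    · have hr : pvRankDict.get? (PySem.Str.lower kv.1) = some 2 := by rw [h2]; decide
      rw [hr]
      simp only [pvChainIdx, pv_memKey_cons, h2, String.reduceBEq, Bool.false_or, Bool.true_or]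
      split_ifs <;> simp_all [pvOmin]
    by_cases h3 : PySem.Str.lower kv.1 = "svelte"
    · have hr : pvRankDict.get? (PySem.Str.lower kv.1) = some 3 := by rw [h3]; decide
      rw [hr]
      simp only [pvChainIdx, pv_memKey_cons, h3, String.reduceBEq, Bool.false_or, Bool.true_or]
      split_ifs <;> simp_all [pvOmin]
    by_cases h4 : PySem.Str.lower kv.1 = "@sveltejs/kit"
    · have hr : pvRankDict.get? (PySem.Str.lower kv.1) = some 4 := by rw [h4]; decide
      rw [hr]
      simp only [pvChainIdx, pv_memKey_cons, h4, String.reduceBEq, Bool.false_or, Bool.true_or]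
      split_ifs <;> simp_all [pvOmin]
    by_cases h5 : PySem.Str.lower kv.1 = "nuxt"
    · have hr : pvRankDict.get? (PySem.Str.lower kv.1) = some 5 := by rw [h5]; decide
      rw [hr]
      simp only [pvChainIdx, pv_memKey_cons, h5, String.reduceBEq, Bool.false_or, Bool.true_or]
      split_ifs <;> simp_all [pvOmin]
    by_cases h6 : PySem.Str.lower kv.1 = "gatsby"
    · have hr : pvRankDict.get? (PySem.Str.lower kv.1) = some 6 := by rw [h6]; decide
      rw [hr]
      simp only [pvChainIdx, pv_memKey_cons, h6, String.reduceBEq, Bool.false_or, Bool.true_or]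
      split_ifs <;> simp_all [pvOmin]
    by_cases h7 : PySem.Str.lower kv.1 = "react"
    · have hr : pvRankDict.get? (PySem.Str.lower kv.1) = some 7 := by rw [h7]; decide
      rw [hr]
      simp only [pvChainIdx, pv_memKey_cons, h7, String.reduceBEq, Bool.false_or, Bool.true_or]
      split_ifs <;> simp_all [pvOmin]
    · 
      have e0 : ("next" == PySem.Str.lower kv.1) = false := beq_eq_false_iff_ne.mpr (fun h => h0 h.symm)
      have e1 : ("@angular/core" == PySem.Str.lower kv.1) = false := beq_eq_false_iff_ne.mpr (fun h => h1 h.symm)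
      have e2 : ("vue" == PySem.Str.lower kv.1) = false := beq_eq_false_iff_ne.mpr (fun h => h2 h.symm)
      have e3 : ("svelte" == PySem.Str.lower kv.1) = false := beq_eq_false_iff_ne.mpr (fun h => h3 h.symm)
      have e4 : ("@sveltejs/kit" == PySem.Str.lower kv.1) = false := beq_eq_false_iff_ne.mpr (fun h => h4 h.symm)
      have e5 : ("nuxt" == PySem.Str.lower kv.1) = false := beq_eq_false_iff_ne.mpr (fun h => h5 h.symm)
      have e6 : ("gatsby" == PySem.Str.lower kv.1) = false := beq_eq_false_iff_ne.mpr (fun h => h6 h.symm)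
      have e7 : ("react" == PySem.Str.lower kv.1) = false := beq_eq_false_iff_ne.mpr (fun h => h7 h.symm)
      have hr : pvRankDict.get? (PySem.Str.lower kv.1) = none := by
        simp only [pvRankDict, PySem.Dict.get?_mk_cons, e0, e1, e2, e3, e4, e5, e6, e7, if_false, Bool.false_eq_true]
        rfl
      rw [hr]
      have hnone : ∀ x : Option Nat, pvOmin none x = x := fun x => rfl
      simp only [pvChainIdx, pv_memKey_cons, e0, e1, e2, e3, e4, e5, e6, e7, Bool.false_or, hnone]

lemma pv_B_eq (deps : List (String × String)) :
    detect_frontend_framework_from_dependencies_alt deps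
      = (pvChainIdx deps).bind (fun i => PySem.List.pyGet? pvFrameworks (i : Int)) := by
  have h : (deps.foldl
      (fun best kv =>
        match pvRankDict.get? (PySem.Str.lower kv.1) with
        | none => best
        | some r =>
          match best with
          | none => some r
          | some b => if r < b then some r else some b) none) = pvBest deps := rfl
  simp only [detect_frontend_framework_from_dependencies_alt, h, pv_best_eq_chain]
  cases pvChainIdx deps <;> rfl

-- ===== VERDICT (by name: the statement is the Claim_ definition above) =====
theorem detect_frontend_framework_from_dependencies_spec : Claim_equal_detect_frontend_framework_from_dependencies := by
  intro deps _
  unfold Spec_detect_frontend_framework_from_dependencies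
  rw [pv_A_eq, pv_B_eq]
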